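-- pv_equiv track=rewrite | github.com/varshagoalla/self-rag | retrieval_lm/dpo_scripts/build_rl_dataset.py | redistribute_cell_targets
-- ===== SOURCE A (Python) =====
-- def redistribute_cell_targets(size, cell_buckets):
--     """Balance across (task_form, retrieval_family) cells with graceful fallback."""
--     cells = list(cell_buckets.keys())
--     base = size // len(cells)
--     targets = {cell: min(base, len(cell_buckets[cell])) for cell in cells}
--     remainder = size - sum(targets.values())
--
--     while remainder > 0:
--         progressed = False
--         for cell in cells:
--             if remainder <= 0:
--                 break
--             if targets[cell] >= len(cell_buckets[cell]):
--                 continue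
--             targets[cell] += 1
--             remainder -= 1
--             progressed = True
--         if not progressed:
--             break
--
--     return targets
-- ===== SOURCE B (Python) =====
-- def _fill_level(sorted_slacks, remainder):
--     # largest k with sum(min(s, k) for s in slacks) <= remainder; requires remainder < sum(slacks)
--     acc = 0
--     n = len(sorted_slacks)
--     for i, s in enumerate(sorted_slacks):
--         cnt = n - i
--         if acc + cnt * s > remainder:
--             return (remainder - acc) // cnt
--         acc += s
--     return 0  # unreachable when remainder < sum(sorted_slacks)
--
--
-- def redistribute_cell_targets(size, cell_buckets):
--     """Balance across (task_form, retrieval_family) cells with graceful fallback."""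
--     items = list(cell_buckets.items())
--     base = size // len(items)
--     t0 = [min(base, len(bucket)) for _, bucket in items]
--     slacks = [len(bucket) - t for (_, bucket), t in zip(items, t0)]
--     remainder = size - sum(t0)
--     if remainder >= sum(slacks):
--         return {cell: len(bucket) for cell, bucket in items}
--     k = _fill_level(sorted(slacks), remainder)
--     r = remainder - sum(min(s, k) for s in slacks)
--     pairs = []
--     for (cell, _), t, s in zip(items, t0, slacks):
--         if s > k and r > 0:
--             pairs.append((cell, t + k + 1))
--             r -= 1
--         else:
--             pairs.append((cell, t + min(s, k)))
--     return dict(pairs)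
-- ===== Notes on version B (the rewrite author's own statement) =====
-- stated objective: alternative
-- what changed: A distributes the post-base remainder by repeated round-robin passes over all cells until it is used up; B instead sorts the slacks once, computes the common fill level k arithmetically (water-filling) and emits every target in a single pass.
import Mathlib
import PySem

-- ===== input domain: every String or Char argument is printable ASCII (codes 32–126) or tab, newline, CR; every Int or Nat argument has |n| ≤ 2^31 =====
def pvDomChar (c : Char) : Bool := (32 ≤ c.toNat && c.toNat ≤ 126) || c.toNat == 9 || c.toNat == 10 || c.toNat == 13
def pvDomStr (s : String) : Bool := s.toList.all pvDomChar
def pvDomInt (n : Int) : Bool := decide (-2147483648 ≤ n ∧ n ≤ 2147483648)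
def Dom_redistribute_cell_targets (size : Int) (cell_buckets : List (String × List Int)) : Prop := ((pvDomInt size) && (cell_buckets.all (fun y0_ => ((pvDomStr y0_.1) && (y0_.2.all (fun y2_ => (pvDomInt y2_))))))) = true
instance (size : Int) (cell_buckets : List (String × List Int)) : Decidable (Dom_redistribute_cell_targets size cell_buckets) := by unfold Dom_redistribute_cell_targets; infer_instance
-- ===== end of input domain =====

-- B replaces A's pass-after-pass round-robin loop by a direct water-filling computation:
-- sort the slacks once, find the common fill level k arithmetically, and emit each target
-- in one pass (objective: alternative — a different algorithm for the same result).

-- ===== PORT A =====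
-- one step of A's inner 'for cell in cells' loop; state = (targets, remainder, progressed)
def pvAstep (cbD : PySem.Dict String (List Int)) (st : PySem.Dict String Int × Int × Bool) (c : String) :
    PySem.Dict String Int × Int × Bool :=
  if st.2.1 ≤ 0 then st
  else if ((cbD.getD c []).length : Int) ≤ st.1.getD c 0 then st
  else (st.1.insert c (st.1.getD c 0 + 1), st.2.1 - 1, true)

-- A's 'while remainder > 0' loop; fuel only makes the recursion structural: each continued
-- iteration decreases the (nonnegative) remainder by at least 1, so remainder+1 steps suffice
def pvAloop (cbD : PySem.Dict String (List Int)) (cells : List String) :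
    Nat → PySem.Dict String Int → Int → PySem.Dict String Int
  | 0, t, _ => t
  | fuel + 1, t, r =>
    if 0 < r then
      let st := cells.foldl (pvAstep cbD) (t, r, false)
      if st.2.2 then pvAloop cbD cells fuel st.1 st.2.1 else st.1
    else t

def redistribute_cell_targets (size : Int) (cell_buckets : List (String × List Int)) : List (String × Int) :=
  let cbD : PySem.Dict String (List Int) := PySem.Dict.mk cell_buckets
  let cells := cbD.keys
  let base := PySem.Int.floordiv size (cells.length : Int)
  let targets := cells.foldl (fun d c => d.insert c (min base ((cbD.getD c []).length : Int))) PySem.Dict.empty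
  let remainder := size - targets.values.sum
  (pvAloop cbD cells (remainder.toNat + 1) targets remainder).items

-- ===== PORT B =====
-- largest k with sum(min(s, k) for s in slacks) <= remainder (requires remainder < sum(slacks))
def pvFillLevel : List Int → Int → Int → Int
  | [], _, _ => 0
  | s :: t, acc, remainder =>
    if remainder < acc + (1 + (t.length : Int)) * s then
      PySem.Int.floordiv (remainder - acc) (1 + (t.length : Int))
    else pvFillLevel t (acc + s) remainder

-- the final 'for … in zip(items, t0, slacks)' building pass of B (dict of fresh keys = pair list)
def pvBuild : List (String × List Int) → List Int → List Int → Int → Int → List (String × Int)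
  | p :: items, t :: ts, s :: ss, k, r =>
    if k < s ∧ 0 < r then (p.1, t + k + 1) :: pvBuild items ts ss k (r - 1)
    else (p.1, t + min s k) :: pvBuild items ts ss k r
  | _, _, _, _, _ => []

def redistribute_cell_targets_alt (size : Int) (cell_buckets : List (String × List Int)) : List (String × Int) :=
  let base := PySem.Int.floordiv size (cell_buckets.length : Int)
  let t0 := cell_buckets.map (fun p => min base (p.2.length : Int))
  let slacks := (cell_buckets.zip t0).map (fun x => (x.1.2.length : Int) - x.2)
  let remainder := size - t0.sum
  if slacks.sum ≤ remainder then cell_buckets.map (fun p => (p.1, (p.2.length : Int)))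
  else
    let k := pvFillLevel (PySem.List.sorted slacks (fun x => x) false) 0 remainder
    let r := remainder - (slacks.map (fun s => min s k)).sum
    pvBuild cell_buckets t0 slacks k r

-- ===== PRECONDITION & SPEC =====
-- Pre_ excludes the empty dict, on which A raises ZeroDivisionError, and association lists with
-- duplicate keys, which do not represent any Python dict (the dict argument collapses them).
def Pre_redistribute_cell_targets (size : Int) (cell_buckets : List (String × List Int)) : Prop :=
  cell_buckets ≠ [] ∧ (cell_buckets.map Prod.fst).Nodup
instance (size : Int) (cell_buckets : List (String × List Int)) : Decidable (Pre_redistribute_cell_targets size cell_buckets) := by unfold Pre_redistribute_cell_targets; infer_instance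
def pvWitness_redistribute_cell_targets : Int × (List (String × List Int)) :=
  (5, [("a", [0, 1]), ("b", [2])])
def Spec_redistribute_cell_targets (size : Int) (cell_buckets : List (String × List Int)) (out : List (String × Int)) : Prop := out = redistribute_cell_targets_alt size cell_buckets
instance (size : Int) (cell_buckets : List (String × List Int)) (out : List (String × Int)) : Decidable (Spec_redistribute_cell_targets size cell_buckets out) := by unfold Spec_redistribute_cell_targets; infer_instance

-- ===== CLAIM (what is proved, stated in full; the proofs are below) =====
def Claim_equal_redistribute_cell_targets : Prop := ∀ (size : Int) (cell_buckets : List (String × List Int)), Dom_redistribute_cell_targets size cell_buckets → Pre_redistribute_cell_targets size cell_buckets → Spec_redistribute_cell_targets size cell_buckets (redistribute_cell_targets size cell_buckets)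

-- ===== LEMMAS AND PROOFS =====

-- positional model of A's inner pass: caps, current values, remainder, progressed flag
def pvPassE : List Int → List Int → Int → Bool → List Int × Int × Bool
  | [], vs, r, p => (vs, r, p)
  | _ :: _, [], r, p => ([], r, p)
  | c :: ct, v :: vt, r, p =>
    if r ≤ 0 then let u := pvPassE ct vt r p; (v :: u.1, u.2)
    else if c ≤ v then let u := pvPassE ct vt r p; (v :: u.1, u.2)
    else let u := pvPassE ct vt (r - 1) true; ((v + 1) :: u.1, u.2)

-- positional model of A's outer while-loop
def pvLoopE (caps : List Int) : Nat → List Int → Int → List Int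
  | 0, vs, _ => vs
  | fuel + 1, vs, r =>
    if 0 < r then
      let u := pvPassE caps vs r false
      if u.2.2 then pvLoopE caps fuel u.1 u.2.1 else u.1
    else vs

-- value shadow of pvBuild: final values from slacks, t0s, level k, partial remainder r
def pvFinV : List Int → List Int → Int → Int → List Int
  | s :: ss, t :: ts, k, r =>
    if k < s ∧ 0 < r then (t + k + 1) :: pvFinV ss ts k (r - 1)
    else (t + min s k) :: pvFinV ss ts k r
  | _, _, _, _ => []

-- how many cells one pass at level m with remainder r serves
def pvServed : List Int → Int → Int → Int
  | [], _, _ => 0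
  | s :: ss, m, r => if r ≤ 0 then 0 else if s ≤ m then pvServed ss m r else 1 + pvServed ss m (r - 1)

def pvSlev (ss : List Int) (m : Int) : Int := (ss.map (fun s => min s m)).sum
def pvCntGt (ss : List Int) (m : Int) : Int := (ss.countP (fun s => decide (m < s)) : Int)

lemma pvZipWith_map_same {α β γ δ : Type} (f : β → γ → δ) (u : α → β) (v : α → γ) (l : List α) :
    List.zipWith f (l.map u) (l.map v) = l.map (fun x => f (u x) (v x)) := by
  induction l with
  | nil => rfl
  | cons a t ih => simp [ih]

lemma pvCntGt_nonneg (ss : List Int) (m : Int) : 0 ≤ pvCntGt ss m := by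
  simp [pvCntGt]

lemma pvCntGt_cons_gt {s m : Int} (ss : List Int) (h : m < s) :
    pvCntGt (s :: ss) m = 1 + pvCntGt ss m := by
  simp only [pvCntGt, List.countP_cons, h, decide_true, if_true]
  push_cast; omega

lemma pvCntGt_cons_le {s m : Int} (ss : List Int) (h : s ≤ m) :
    pvCntGt (s :: ss) m = pvCntGt ss m := by
  have hd : (decide (m < s)) = false := decide_eq_false (by omega)
  simp [pvCntGt, List.countP_cons, hd]

lemma pvServed_of_cnt_le : ∀ (ss : List Int) (m r : Int), 0 ≤ r → pvCntGt ss m ≤ r →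
    pvServed ss m r = pvCntGt ss m := by
  intro ss
  induction ss with
  | nil => intro m r _ _; simp [pvServed, pvCntGt]
  | cons s ss ih =>
    intro m r hr hc
    by_cases hsm : s ≤ m
    · rw [pvCntGt_cons_le ss hsm] at hc ⊢
      rcases (by omega : r = 0 ∨ ¬ r ≤ 0) with h | h
      · subst h
        have h0 : pvCntGt ss m = 0 := le_antisymm hc (pvCntGt_nonneg ss m)
        rw [h0]
        simp [pvServed]
      · rw [show pvServed (s :: ss) m r = pvServed ss m r by simp [pvServed, h, hsm]]
        exact ih m r hr hc
    · have hms : m < s := by omega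
      rw [pvCntGt_cons_gt ss hms] at hc ⊢
      have h : ¬ r ≤ 0 := by have := pvCntGt_nonneg ss m; omega
      rw [show pvServed (s :: ss) m r = 1 + pvServed ss m (r - 1) by simp [pvServed, h, hsm]]
      rw [ih m (r - 1) (by omega) (by omega)]

lemma pvServed_of_le_cnt : ∀ (ss : List Int) (m r : Int), 0 ≤ r → r ≤ pvCntGt ss m →
    pvServed ss m r = r := by
  intro ss
  induction ss with
  | nil => intro m r h1 h2; simp [pvCntGt] at h2; simp [pvServed]; omega
  | cons s ss ih =>
    intro m r hr hc
    by_cases hr0 : r ≤ 0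
    · simp [pvServed, hr0]; omega
    by_cases hsm : s ≤ m
    · rw [pvCntGt_cons_le ss hsm] at hc
      rw [show pvServed (s :: ss) m r = pvServed ss m r by simp [pvServed, hr0, hsm]]
      exact ih m r hr hc
    · have hms : m < s := by omega
      rw [pvCntGt_cons_gt ss hms] at hc
      rw [show pvServed (s :: ss) m r = 1 + pvServed ss m (r - 1) by simp [pvServed, hr0, hsm]]
      rw [ih m (r - 1) (by omega) (by omega)]
      omega

lemma pvFinV_of_cnt_le : ∀ (ss ts : List Int) (m r : Int), pvCntGt ss m ≤ r →
    pvFinV ss ts m r = List.zipWith (fun t s => t + min s (m + 1)) ts ss := by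
  intro ss
  induction ss with
  | nil => intro ts m r _; cases ts <;> simp [pvFinV]
  | cons s ss ih =>
    intro ts m r hc
    cases ts with
    | nil => simp [pvFinV]
    | cons t ts =>
      by_cases hsm : m < s
      · rw [pvCntGt_cons_gt ss hsm] at hc
        have hr : 0 < r := by have := pvCntGt_nonneg ss m; omega
        have hmin : min s (m+1) = m + 1 := by omega
        simp [pvFinV, hsm, hr, ih ts m (r-1) (by omega), hmin]
        omega
      · rw [pvCntGt_cons_le ss (by omega)] at hc
        have hmin : min s (m+1) = min s m := by omega
        simp [pvFinV, hsm, ih ts m r hc, hmin]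

lemma pvFinV_of_r_nonpos : ∀ (ss ts : List Int) (m r : Int), r ≤ 0 →
    pvFinV ss ts m r = List.zipWith (fun t s => t + min s m) ts ss := by
  intro ss
  induction ss with
  | nil => intro ts m r _; cases ts <;> simp [pvFinV]
  | cons s ss ih =>
    intro ts m r hr
    cases ts with
    | nil => simp [pvFinV]
    | cons t ts =>
      simp only [pvFinV]
      rw [if_neg (by omega : ¬ (m < s ∧ 0 < r))]
      simp [ih ts m r hr]

lemma pvFinV_of_all_le : ∀ (ss ts : List Int) (m r : Int), (∀ s ∈ ss, s ≤ m) →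
    pvFinV ss ts m r = List.zipWith (fun t s => t + min s m) ts ss := by
  intro ss
  induction ss with
  | nil => intro ts m r _; cases ts <;> simp [pvFinV]
  | cons s ss ih =>
    intro ts m r h
    cases ts with
    | nil => simp [pvFinV]
    | cons t ts =>
      have hs := h s (by simp)
      simp only [pvFinV]
      rw [if_neg (by omega : ¬ (m < s ∧ 0 < r))]
      simp [ih ts m r (fun x hx => h x (by simp [hx]))]

lemma pvSlev_succ (ss : List Int) (m : Int) : pvSlev ss (m + 1) = pvSlev ss m + pvCntGt ss m := by
  induction ss with
  | nil => simp [pvSlev, pvCntGt]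
  | cons s ss ih =>
    by_cases h : m < s <;>
      simp [pvSlev, pvCntGt, List.countP_cons, h] at ih ⊢ <;> push_cast <;> omega

lemma pvSlev_mono (ss : List Int) {m m' : Int} (h : m ≤ m') : pvSlev ss m ≤ pvSlev ss m' := by
  induction ss with
  | nil => simp [pvSlev]
  | cons s ss ih => simp only [pvSlev, List.map_cons, List.sum_cons] at ih ⊢; have := min_le_min (le_refl s) h; omega

lemma pvSlev_zero (ss : List Int) (h : ∀ s ∈ ss, 0 ≤ s) : pvSlev ss 0 = 0 := by
  induction ss with
  | nil => simp [pvSlev]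
  | cons s ss ih =>
    have := h s (by simp)
    simp only [pvSlev, List.map_cons, List.sum_cons] at ih ⊢
    rw [ih (fun x hx => h x (by simp [hx]))]
    omega

lemma pvSlev_of_all_le (ss : List Int) {m : Int} (h : ∀ s ∈ ss, s ≤ m) : pvSlev ss m = ss.sum := by
  induction ss with
  | nil => simp [pvSlev]
  | cons s ss ih =>
    have := h s (by simp)
    simp only [pvSlev, List.map_cons, List.sum_cons] at ih ⊢
    rw [ih (fun x hx => h x (by simp [hx]))]
    omega

lemma pvCntGt_eq_zero_iff (ss : List Int) (m : Int) : pvCntGt ss m = 0 ↔ ∀ s ∈ ss, s ≤ m := by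
  simp only [pvCntGt, Nat.cast_eq_zero, List.countP_eq_zero]
  constructor
  · intro h s hs; have := h s hs; simp at this; omega
  · intro h s hs; have := h s hs; simp; omega

lemma pvLvl_congr (ss ts : List Int) {m m' : Int} (h : ∀ s ∈ ss, min s m = min s m') :
    List.zipWith (fun t s => t + min s m) ts ss = List.zipWith (fun t s => t + min s m') ts ss := by
  induction ss generalizing ts with
  | nil => simp
  | cons s ss ih =>
    cases ts with
    | nil => simp
    | cons t ts => simp [h s (by simp), ih ts (fun x hx => h x (by simp [hx]))]

lemma pvSlev_perm {l l' : List Int} (h : l.Perm l') (m : Int) : pvSlev l m = pvSlev l' m :=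
  List.Perm.sum_eq (h.map _)

lemma pvPassE_length : ∀ (caps vs : List Int) (r : Int) (p : Bool), vs.length = caps.length →
    (pvPassE caps vs r p).1.length = vs.length := by
  intro caps
  induction caps with
  | nil => intro vs r p h; simp [pvPassE]
  | cons c ct ih =>
    intro vs r p h
    cases vs with
    | nil => simp at h
    | cons v vt =>
      simp only [pvPassE]
      split_ifs <;> simp [ih vt _ _ (by simpa using h)]

lemma pvServed_nonneg : ∀ (ss : List Int) (m r : Int), 0 ≤ pvServed ss m r := by
  intro ss
  induction ss with
  | nil => intro m r; simp [pvServed]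
  | cons a as ih => intro m r; simp only [pvServed]; split_ifs <;> [omega; exact ih m r; (have := ih m (r-1); omega)]

lemma pvServed_of_nonpos : ∀ (ss : List Int) (m r : Int), r ≤ 0 → pvServed ss m r = 0 := by
  intro ss
  induction ss with
  | nil => intro m r _; simp [pvServed]
  | cons a as ih => intro m r h; simp [pvServed, h]

lemma pvPassE_lvl : ∀ (ss ts : List Int) (m r : Int) (p : Bool), ss.length = ts.length →
    pvPassE (List.zipWith (fun t s => t + s) ts ss) (List.zipWith (fun t s => t + min s m) ts ss) r p
      = (pvFinV ss ts m r, r - pvServed ss m r, p || decide (0 < pvServed ss m r)) := by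
  intro ss
  induction ss with
  | nil => intro ts m r p h; simp [pvPassE, pvFinV, pvServed]
  | cons s ss ih =>
    intro ts m r p h
    cases ts with
    | nil => simp at h
    | cons t ts =>
      have hlen : ss.length = ts.length := by simpa using h
      simp only [List.zipWith_cons_cons, pvPassE]
      by_cases hr : r ≤ 0
      · rw [if_pos hr]
        simp only [ih ts m r p hlen]
        rw [pvServed_of_nonpos _ _ _ hr, pvServed_of_nonpos _ _ _ hr]
        simp only [pvFinV]
        rw [if_neg (by omega : ¬ (m < s ∧ 0 < r))]
      · rw [if_neg hr]
        by_cases hsm : s ≤ m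
        · rw [if_pos (by omega : t + s ≤ t + min s m)]
          simp only [ih ts m r p hlen]
          rw [show pvServed (s :: ss) m r = pvServed ss m r by simp [pvServed, hr, hsm]]
          simp only [pvFinV]
          rw [if_neg (by omega : ¬ (m < s ∧ 0 < r))]
        · rw [if_neg (by omega : ¬ (t + s ≤ t + min s m))]
          simp only [ih ts m (r - 1) true hlen]
          rw [show pvServed (s :: ss) m r = 1 + pvServed ss m (r - 1) by simp [pvServed, hr, hsm]]
          simp only [pvFinV]
          rw [if_pos (by omega : m < s ∧ 0 < r)]
          have hmin : t + min s m + 1 = t + m + 1 := by omega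
          have hsv := pvServed_nonneg ss m (r - 1)
          simp only [hmin, Prod.mk.injEq, true_and]
          refine ⟨by omega, ?_⟩
          rw [decide_eq_true (by omega : (0:Int) < 1 + pvServed ss m (r-1))]
          simp

lemma pvLoop_char (ss ts : List Int) (hlen : ss.length = ts.length) (R k : Int)
    (hk0 : 0 ≤ k) (hSk : pvSlev ss k ≤ R) (hspec : R < pvSlev ss (k + 1) ∨ pvCntGt ss k = 0) :
    ∀ (n : Nat) (m : Int) (fuel : Nat), m = k - n → 0 ≤ m → (R - pvSlev ss m).toNat < fuel →
    pvLoopE (List.zipWith (fun t s => t + s) ts ss) fuel (List.zipWith (fun t s => t + min s m) ts ss) (R - pvSlev ss m)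
      = pvFinV ss ts k (R - pvSlev ss k) := by
  intro n
  induction n with
  | zero =>
    intro m fuel hm hm0 hfuel
    have hmk : m = k := by omega
    subst hmk
    obtain ⟨f, rfl⟩ : ∃ f, fuel = f + 1 := ⟨fuel - 1, by omega⟩
    set r := R - pvSlev ss m with hrdef
    have hr0 : 0 ≤ r := by omega
    simp only [pvLoopE]
    by_cases hr : 0 < r
    · rw [if_pos hr]
      simp only [pvPassE_lvl ss ts m r false hlen]
      rcases hspec with hlt | hcnt
      · -- partial pass: r < cntGt
        have hrc : r < pvCntGt ss m := by
          have := pvSlev_succ ss m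
          omega
        rw [pvServed_of_le_cnt ss m r hr0 (by omega)]
        rw [decide_eq_true hr]
        simp only [Bool.false_or, if_pos]
        have hf : ∃ f', f = f' + 1 := ⟨f - 1, by omega⟩
        obtain ⟨f', rfl⟩ := hf
        simp only [pvLoopE]
        rw [if_neg (by omega : ¬ (0:Int) < r - r)]
      · -- no cell has slack: nothing served, not progressed
        rw [pvServed_of_cnt_le ss m r hr0 (by omega), hcnt]
        simp
    · rw [if_neg hr]
      have : r = 0 := by omega
      rw [pvFinV_of_r_nonpos ss ts m r (by omega)]
  | succ n ihn =>
    intro m fuel hm hm0 hfuel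
    have hmk : m + 1 ≤ k := by omega
    have hmono : pvSlev ss m ≤ pvSlev ss k := pvSlev_mono ss (by omega)
    have hmono1 : pvSlev ss (m + 1) ≤ pvSlev ss k := pvSlev_mono ss (by omega)
    set r := R - pvSlev ss m with hrdef
    have hr0 : 0 ≤ r := by omega
    obtain ⟨f, rfl⟩ : ∃ f, fuel = f + 1 := ⟨fuel - 1, by omega⟩
    by_cases hcnt : pvCntGt ss m = 0
    · -- all slacks ≤ m: states at level m and k coincide, loop stops at once
      have hall : ∀ s ∈ ss, s ≤ m := (pvCntGt_eq_zero_iff ss m).mp hcnt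
      have hallk : ∀ s ∈ ss, s ≤ k := fun s hs => le_trans (hall s hs) (by omega)
      have hSm : pvSlev ss m = pvSlev ss k := by
        rw [pvSlev_of_all_le ss hall, pvSlev_of_all_le ss hallk]
      have hlvl : List.zipWith (fun t s => t + min s m) ts ss
          = List.zipWith (fun t s => t + min s k) ts ss :=
        pvLvl_congr ss ts (fun s hs => by have h1 := hall s hs; have h2 := hallk s hs; omega)
      simp only [pvLoopE]
      by_cases hr : 0 < r
      · rw [if_pos hr]
        simp only [pvPassE_lvl ss ts m r false hlen]
        rw [pvServed_of_cnt_le ss m r hr0 (by omega), hcnt]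
        simp only [decide_eq_false (by omega : ¬ (0:Int) < 0), Bool.or_false, if_neg Bool.false_ne_true]
        rw [pvFinV_of_all_le ss ts m r hall, pvFinV_of_all_le ss ts k _ hallk, hlvl]
      · rw [if_neg hr]
        rw [pvFinV_of_r_nonpos ss ts k _ (by omega), hlvl]
    · -- full pass to level m+1
      have hcpos : 0 < pvCntGt ss m := lt_of_le_of_ne (pvCntGt_nonneg ss m) (Ne.symm hcnt)
      have hsucc := pvSlev_succ ss m
      have hrc : pvCntGt ss m ≤ r := by omega
      have hr : 0 < r := by omega
      simp only [pvLoopE]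
      rw [if_pos hr]
      simp only [pvPassE_lvl ss ts m r false hlen]
      rw [pvServed_of_cnt_le ss m r hr0 hrc]
      rw [decide_eq_true hcpos]
      simp only [Bool.false_or, if_pos]
      rw [pvFinV_of_cnt_le ss ts m r hrc]
      have hrw : r - pvCntGt ss m = R - pvSlev ss (m + 1) := by omega
      rw [hrw]
      exact ihn (m + 1) f (by omega) (by omega) (by omega)

lemma pvSlev_const_of_le (t : List Int) {m : Int} (h : ∀ x ∈ t, m ≤ x) :
    pvSlev t m = (t.length : Int) * m := by
  induction t with
  | nil => simp [pvSlev]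
  | cons a as ih =>
    have := h a (by simp)
    simp only [pvSlev, List.map_cons, List.sum_cons, List.length_cons] at ih ⊢
    rw [ih (fun x hx => h x (by simp [hx]))]
    have : min a m = m := by omega
    rw [this]; push_cast; ring

lemma pvFillLevel_spec : ∀ (t : List Int), t.Pairwise (· ≤ ·) → (∀ x ∈ t, 0 ≤ x) →
    ∀ (acc R : Int), 0 ≤ acc → acc ≤ R → R < acc + t.sum →
    0 ≤ pvFillLevel t acc R ∧ acc + pvSlev t (pvFillLevel t acc R) ≤ R ∧
      R < acc + pvSlev t (pvFillLevel t acc R + 1) := by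
  intro t
  induction t with
  | nil =>
    intro _ _ acc R hacc haccR hRlt
    simp [pvSlev] at hRlt ⊢
    omega
  | cons s rest ih =>
    intro hpw hnn acc R hacc haccR hRlt
    have hs0 : 0 ≤ s := hnn s (by simp)
    have hrest_ge : ∀ x ∈ rest, s ≤ x := by
      intro x hx
      exact (List.pairwise_cons.mp hpw).1 x hx
    have hcnt : (0:Int) < 1 + (rest.length : Int) := by positivity
    by_cases hbr : R < acc + (1 + (rest.length : Int)) * s
    · -- break: k = (R - acc) // cnt
      rw [show pvFillLevel (s :: rest) acc R = PySem.Int.floordiv (R - acc) (1 + (rest.length : Int)) by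
        simp [pvFillLevel, hbr]]
      set cnt : Int := 1 + (rest.length : Int) with hcntdef
      set k : Int := PySem.Int.floordiv (R - acc) cnt with hkdef
      have hfl := (PySem.Int.floordiv_eq_iff_of_pos (a := R - acc) (b := cnt) hcnt).mp rfl
      have hk0 : 0 ≤ k := by
        rcases (by omega : 0 ≤ k ∨ k ≤ -1) with h | h
        · exact h
        · exfalso; nlinarith [hfl.2]
      have hks : k < s := by
        by_contra hc
        push_neg at hc
        nlinarith [hfl.1]
      -- every element of s :: rest is ≥ s > k, hence ≥ k and ≥ k+1
      have hgek : ∀ x ∈ s :: rest, k ≤ x := by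
        intro x hx
        rcases List.mem_cons.mp hx with rfl | hx'
        · omega
        · have := hrest_ge x hx'; omega
      have hgek1 : ∀ x ∈ s :: rest, k + 1 ≤ x := by
        intro x hx
        rcases List.mem_cons.mp hx with rfl | hx'
        · omega
        · have := hrest_ge x hx'; omega
      rw [pvSlev_const_of_le _ hgek, pvSlev_const_of_le _ hgek1]
      simp only [List.length_cons]
      push_cast
      constructor
      · exact hk0
      constructor
      · nlinarith [hfl.1]
      · nlinarith [hfl.2]
    · -- no break: recurse with acc + s
      rw [show pvFillLevel (s :: rest) acc R = pvFillLevel rest (acc + s) R by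
        simp [pvFillLevel, hbr]]
      push_neg at hbr
      have haccs : acc + s ≤ R := by nlinarith
      have hsum : R < acc + s + rest.sum := by
        simp only [List.sum_cons] at hRlt; omega
      obtain ⟨hk0, hle, hlt⟩ := ih (List.pairwise_cons.mp hpw).2 (fun x hx => hnn x (by simp [hx]))
        (acc + s) R (by omega) haccs hsum
      set k := pvFillLevel rest (acc + s) R with hkdef
      -- show s ≤ k so that min s k = s and min s (k+1) = s
      have hsk : s ≤ k := by
        by_contra hc
        push_neg at hc
        have h1 : ∀ x ∈ rest, k + 1 ≤ x := by
          intro x hx; have := hrest_ge x hx; omega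
        rw [pvSlev_const_of_le rest h1] at hlt
        nlinarith
      have h1 : min s k = s := by omega
      have h2 : min s (k + 1) = s := by omega
      simp only [pvSlev, List.map_cons, List.sum_cons, h1, h2]
      refine ⟨hk0, ?_, ?_⟩
      · have : pvSlev rest k = (rest.map (fun s => min s k)).sum := rfl
        omega
      · have : pvSlev rest (k+1) = (rest.map (fun s => min s (k+1))).sum := rfl
        omega

lemma pvGet?_mk_append_cons (pre : List (String × Int)) (k : String) (v : Int) (rest : List (String × Int))
    (h : k ∉ pre.map Prod.fst) :
    (PySem.Dict.mk (pre ++ (k, v) :: rest)).get? k = some v := by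
  induction pre with
  | nil => simp [PySem.Dict.get?_mk_cons]
  | cons p pre ih =>
    simp only [List.map_cons, List.mem_cons, not_or] at h
    rw [List.cons_append, PySem.Dict.get?_mk_cons]
    rw [if_neg (by simpa using fun hh : p.1 = k => h.1 hh.symm)]
    exact ih h.2

lemma pvGetD_mk_append_cons (pre : List (String × Int)) (k : String) (v : Int) (rest : List (String × Int))
    (h : k ∉ pre.map Prod.fst) :
    (PySem.Dict.mk (pre ++ (k, v) :: rest)).getD k 0 = v := by
  rw [PySem.Dict.getD_eq_get?_getD, pvGet?_mk_append_cons pre k v rest h]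
  rfl

lemma pvInsert_mk_append_cons (pre : List (String × Int)) (k : String) (v w : Int) (rest : List (String × Int))
    (h1 : k ∉ pre.map Prod.fst) (h2 : k ∉ rest.map Prod.fst) :
    (PySem.Dict.mk (pre ++ (k, v) :: rest)).insert k w = PySem.Dict.mk (pre ++ (k, w) :: rest) := by
  have hcont : (PySem.Dict.mk (pre ++ (k, v) :: rest)).contains k = true := by
    rw [PySem.Dict.contains_mk]
    simp
  apply PySem.Dict.ext
  rw [PySem.Dict.items_insert_of_contains _ _ hcont]
  have hmap : ∀ (l : List (String × Int)), k ∉ l.map Prod.fst →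
      l.map (fun p => if (p.1 == k) = true then (k, w) else p) = l := by
    intro l hl
    induction l with
    | nil => rfl
    | cons a t iht =>
      simp only [List.map_cons, List.mem_cons, not_or] at hl ⊢
      rw [if_neg (by simpa using fun hh : a.1 = k => hl.1 hh.symm), iht hl.2]
  show (pre ++ (k, v) :: rest).map _ = _
  rw [List.map_append, List.map_cons, hmap pre h1, hmap rest h2, if_pos (by simp)]

lemma pvFoldl_stepA (cbD : PySem.Dict String (List Int)) :
    ∀ (q : List (String × List Int)) (vs : List Int) (pre : List (String × Int)) (r : Int) (p : Bool),
    vs.length = q.length →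
    (pre.map Prod.fst ++ q.map Prod.fst).Nodup →
    (∀ x ∈ q, cbD.getD x.1 [] = x.2) →
    (q.map Prod.fst).foldl (pvAstep cbD) (PySem.Dict.mk (pre ++ (q.map Prod.fst).zip vs), r, p)
      = (PySem.Dict.mk (pre ++ (q.map Prod.fst).zip (pvPassE (q.map (fun x => (x.2.length : Int))) vs r p).1),
         (pvPassE (q.map (fun x => (x.2.length : Int))) vs r p).2) := by
  intro q
  induction q with
  | nil => intro vs pre r p _ _ _; simp [pvPassE]
  | cons x qt ih =>
    intro vs pre r p hlen hnd hget
    cases vs with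
    | nil => simp at hlen
    | cons v vt =>
      have hlen' : vt.length = qt.length := by simpa using hlen
      have hklen : (qt.map Prod.fst).length ≤ vt.length := by simp [hlen']
      -- facts from nodup
      have hx_pre : x.1 ∉ pre.map Prod.fst := by
        rw [List.nodup_append] at hnd
        intro hmem
        exact hnd.2.2 x.1 hmem x.1 (by simp) rfl
      have hx_qt : x.1 ∉ qt.map Prod.fst := by
        rw [List.nodup_append] at hnd
        have := hnd.2.1
        simp only [List.map_cons, List.nodup_cons] at this
        exact this.1
      have hx_zip : x.1 ∉ ((qt.map Prod.fst).zip vt).map Prod.fst := by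
        rw [List.map_fst_zip hklen]; exact hx_qt
      have hcap : cbD.getD x.1 [] = x.2 := hget x (by simp)
      have hnd' : ∀ (w : Int), ((pre ++ [(x.1, w)]).map Prod.fst ++ qt.map Prod.fst).Nodup := by
        intro w
        simp only [List.map_append, List.map_cons, List.map_nil, List.append_assoc,
          List.cons_append, List.nil_append] at hnd ⊢
        exact hnd
      have hget' : ∀ y ∈ qt, cbD.getD y.1 [] = y.2 := fun y hy => hget y (by simp [hy])
      -- unfold one foldl step
      simp only [List.map_cons, List.foldl_cons, List.zip_cons_cons, pvAstep]
      rw [show pre ++ (x.1, v) :: (qt.map Prod.fst).zip vt = pre ++ (x.1, v) :: (qt.map Prod.fst).zip vt from rfl]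
      rw [pvGetD_mk_append_cons pre x.1 v _ hx_pre, hcap]
      simp only [pvPassE]
      by_cases hr : r ≤ 0
      · rw [if_pos hr, if_pos hr]
        have := ih vt (pre ++ [(x.1, v)]) r p hlen' (hnd' v) hget'
        simp only [List.append_assoc, List.cons_append, List.nil_append] at this
        rw [this]
        simp [List.zip_cons_cons]
      · rw [if_neg hr, if_neg hr]
        by_cases hc : ((x.2.length : Int)) ≤ v
        · rw [if_pos hc, if_pos hc]
          have := ih vt (pre ++ [(x.1, v)]) r p hlen' (hnd' v) hget'
          simp only [List.append_assoc, List.cons_append, List.nil_append] at this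
          rw [this]
          simp [List.zip_cons_cons]
        · rw [if_neg hc, if_neg hc]
          rw [pvInsert_mk_append_cons pre x.1 v (v + 1) _ hx_pre hx_zip]
          have := ih vt (pre ++ [(x.1, v + 1)]) (r - 1) true hlen' (hnd' (v + 1)) hget'
          simp only [List.append_assoc, List.cons_append, List.nil_append] at this
          rw [this]
          simp [List.zip_cons_cons]

lemma pvLoopA_eq (cb : List (String × List Int)) (hnd : (cb.map Prod.fst).Nodup)
    (hget : ∀ x ∈ cb, (PySem.Dict.mk cb).getD x.1 [] = x.2) :
    ∀ (fuel : Nat) (vs : List Int) (r : Int), vs.length = cb.length →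
    pvAloop (PySem.Dict.mk cb) (cb.map Prod.fst) fuel (PySem.Dict.mk ((cb.map Prod.fst).zip vs)) r
      = PySem.Dict.mk ((cb.map Prod.fst).zip (pvLoopE (cb.map (fun x => (x.2.length : Int))) fuel vs r)) := by
  intro fuel
  induction fuel with
  | zero => intro vs r _; simp [pvAloop, pvLoopE]
  | succ f ih =>
    intro vs r hlen
    simp only [pvAloop, pvLoopE]
    by_cases hr : 0 < r
    · rw [if_pos hr, if_pos hr]
      have hstep := pvFoldl_stepA (PySem.Dict.mk cb) cb vs [] r false hlen (by simpa using hnd) hget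
      simp only [List.nil_append] at hstep
      rw [hstep]
      by_cases hp : (pvPassE (cb.map (fun x => (x.2.length : Int))) vs r false).2.2 = true
      · rw [if_pos hp, if_pos hp]
        exact ih _ _ (by rw [pvPassE_length _ vs r false (by simp [hlen])]; exact hlen)
      · rw [if_neg hp, if_neg hp]
    · rw [if_neg hr, if_neg hr]

lemma pvBuild_eq : ∀ (cb : List (String × List Int)) (ts ss : List Int) (k r : Int),
    pvBuild cb ts ss k r = (cb.map Prod.fst).zip (pvFinV ss ts k r) := by
  intro cb
  induction cb with
  | nil => intro ts ss k r; simp [pvBuild]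
  | cons p cbt ih =>
    intro ts ss k r
    cases ts with
    | nil => cases ss <;> simp [pvBuild, pvFinV]
    | cons t tt =>
      cases ss with
      | nil => simp [pvBuild, pvFinV]
      | cons s st =>
        simp only [pvBuild, pvFinV]
        by_cases h : k < s ∧ 0 < r
        · rw [if_pos h, if_pos h]; simp [ih]
        · rw [if_neg h, if_neg h]; simp [ih]

-- ===== VERDICT (by name: the statement is the Claim_ definition above) =====
theorem redistribute_cell_targets_spec : Claim_equal_redistribute_cell_targets := by
  unfold Claim_equal_redistribute_cell_targets
  intro size cb _ hpre
  obtain ⟨hne, hnd⟩ := hpre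
  unfold Spec_redistribute_cell_targets
  -- abbreviations
  set names : List String := cb.map Prod.fst with hnames
  have hn0 : 0 < cb.length := List.length_pos_of_ne_nil hne
  set base : Int := PySem.Int.floordiv size (cb.length : Int) with hbase
  set tsf : (String × List Int) → Int := fun p => min base (p.2.length : Int) with htsf
  set capf : (String × List Int) → Int := fun p => ((p.2.length : Int)) with hcapf
  set ssf : (String × List Int) → Int := fun p => capf p - tsf p with hssf
  set ts : List Int := cb.map tsf with hts
  set caps : List Int := cb.map capf with hcaps
  set ss : List Int := cb.map ssf with hss
  have hlen_ts : ts.length = cb.length := by simp [hts]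
  have hlen_ss_ts : ss.length = ts.length := by simp [hss, hts]
  have hss_nonneg : ∀ s ∈ ss, 0 ≤ s := by
    intro s hs
    rw [hss] at hs
    obtain ⟨p, _, rfl⟩ := List.mem_map.mp hs
    simp [hssf, hcapf, htsf]
  -- lookups in the input dict
  have hkeysnd : (PySem.Dict.mk cb).keys.Nodup := by simpa [PySem.Dict.keys_mk] using hnd
  have hget : ∀ x ∈ cb, (PySem.Dict.mk cb).getD x.1 [] = x.2 := by
    intro x hx
    exact PySem.Dict.getD_of_mem_items _ (by simpa using hx) hkeysnd []
  -- remainder is nonnegative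
  have hmod : base * (cb.length : Int) + PySem.Int.mod size (cb.length : Int) = size := by
    rw [hbase]; exact PySem.Int.floordiv_mul_add_mod size _
  have hmodnn := PySem.Int.mod_nonneg size (b := (cb.length : Int)) (by exact_mod_cast hn0)
  have hts_sum_le : ts.sum ≤ (cb.length : Int) * base := by
    have h1 : ∀ x ∈ ts, x ≤ base := by
      intro x hx
      rw [hts] at hx
      obtain ⟨p, _, rfl⟩ := List.mem_map.mp hx
      simp [htsf]
    have := List.sum_le_card_nsmul ts base h1
    rw [hlen_ts] at this
    simpa [nsmul_eq_mul] using this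
  set R : Int := size - ts.sum with hR
  have hR0 : 0 ≤ R := by
    have h2 : (cb.length : Int) * base = base * (cb.length : Int) := mul_comm _ _
    omega
  -- ===== A side =====
  have hA : redistribute_cell_targets size cb
      = names.zip (pvLoopE caps (R.toNat + 1) ts R) := by
    show (pvAloop _ _ _ _ _).items = _
    have hkeys : (PySem.Dict.mk cb).keys = names := PySem.Dict.keys_mk cb
    rw [hkeys]
    have hlenn : ((names.length : Int)) = (cb.length : Int) := by simp [hnames]
    -- the dict comprehension
    have hfold : names.foldl (fun d c =>
          d.insert c (min (PySem.Int.floordiv size (names.length : Int))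
            (((PySem.Dict.mk cb).getD c []).length : Int))) PySem.Dict.empty
        = PySem.Dict.mk (names.zip ts) := by
      apply PySem.Dict.ext
      rw [PySem.Dict.items_foldl_insert_fresh names (fun c => c) _ PySem.Dict.empty
        (fun a _ => PySem.Dict.contains_empty a) (by simpa [hnames] using hnd)]
      show PySem.Dict.empty.items ++ names.map _ = _
      have : names.map (fun c => (c, min (PySem.Int.floordiv size (names.length : Int))
            (((PySem.Dict.mk cb).getD c []).length : Int)))
          = cb.map (fun p => (p.1, tsf p)) := by
        rw [hnames, List.map_map]
        apply List.map_congr_left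
        intro p hp
        simp only [Function.comp_apply]
        rw [hget p hp, hlenn]
      rw [this, ← List.zip_map']
      show [] ++ _ = _
      rw [List.nil_append, hnames, hts]
    rw [hfold]
    have hvals : (PySem.Dict.mk (names.zip ts)).values = ts := by
      show (names.zip ts).map Prod.snd = ts
      exact List.map_snd_zip (by simp [hnames, hlen_ts])
    rw [hvals]
    rw [pvLoopA_eq cb hnd hget (((size : Int) - ts.sum).toNat + 1) ts (size - ts.sum) hlen_ts]
  -- rewrite the initial state as the level-0 state
  have hcaps_zip : List.zipWith (fun t s => t + s) ts ss = caps := by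
    rw [hts, hss, pvZipWith_map_same]
    apply List.map_congr_left
    intro p _
    simp [hssf]
  have hts_lvl0 : List.zipWith (fun t s => t + min s 0) ts ss = ts := by
    rw [hts, hss, pvZipWith_map_same]
    apply List.map_congr_left
    intro p hp
    have : 0 ≤ ssf p := by simp [hssf, hcapf, htsf]
    have hmin : min (ssf p) 0 = 0 := by omega
    rw [hmin, add_zero]
  have hS0 : pvSlev ss 0 = 0 := pvSlev_zero ss hss_nonneg
  -- ===== B side and the two branches =====
  have hBslacks : (cb.zip ts).map (fun x => ((x.1.2.length : Int)) - x.2) = ss := by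
    have h1 : cb.zip ts = cb.map (fun p => (p, tsf p)) := by
      conv_lhs => rw [show cb = cb.map id from (List.map_id cb).symm]
      rw [hts, List.zip_map']
      simp
    rw [h1, List.map_map, hss]
    apply List.map_congr_left
    intro p _
    simp [hssf, hcapf]
  have hloop : ∀ k : Int, 0 ≤ k → pvSlev ss k ≤ R →
      (R < pvSlev ss (k + 1) ∨ pvCntGt ss k = 0) →
      pvLoopE caps (R.toNat + 1) ts R = pvFinV ss ts k (R - pvSlev ss k) := by
    intro k hk0 hSk hspec
    have := pvLoop_char ss ts hlen_ss_ts R k hk0 hSk hspec k.toNat 0 (R.toNat + 1)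
      (by omega) le_rfl (by omega)
    rw [hcaps_zip, hts_lvl0, hS0, sub_zero] at this
    exact this
  rw [hA]
  simp only [redistribute_cell_targets_alt]
  rw [← hbase, ← htsf, ← hts, hBslacks, ← hR]
  by_cases hsat : ss.sum ≤ R
  · rw [if_pos hsat]
    set k : Int := ss.foldl max 0 with hk
    have hmax := PySem.List.le_foldl_max ss 0
    have hk0 : 0 ≤ k := hmax.1
    have hall : ∀ s ∈ ss, s ≤ k := hmax.2
    rw [hloop k hk0 (by rw [pvSlev_of_all_le ss hall]; exact hsat)
      (Or.inr ((pvCntGt_eq_zero_iff ss k).mpr hall))]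
    rw [pvFinV_of_all_le ss ts k _ hall]
    have hcapsmap : List.zipWith (fun t s => t + min s k) ts ss = cb.map capf := by
      rw [hts, hss, pvZipWith_map_same]
      apply List.map_congr_left
      intro p hp
      have h1 : 0 ≤ ssf p := by simp [hssf, hcapf, htsf]
      have h2 : ssf p ≤ k := hall _ (List.mem_map_of_mem hp)
      have hmin : min (ssf p) k = ssf p := by omega
      rw [hmin]
      simp [hssf]
    rw [hcapsmap, hnames, ← List.zip_map']
  · rw [if_neg hsat]
    push_neg at hsat
    have hperm : (PySem.List.sorted ss (fun x => x) false).Perm ss :=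
      PySem.List.sorted_perm ss _ false
    have hpw : (PySem.List.sorted ss (fun x => x) false).Pairwise (· ≤ ·) :=
      PySem.List.sorted_pairwise ss (fun x => x)
    have hnn : ∀ x ∈ (PySem.List.sorted ss (fun x => x) false), 0 ≤ x :=
      fun x hx => hss_nonneg x (hperm.mem_iff.mp hx)
    have hsum : (PySem.List.sorted ss (fun x => x) false).sum = ss.sum := hperm.sum_eq
    obtain ⟨hk0, h1, h2⟩ := pvFillLevel_spec (PySem.List.sorted ss (fun x => x) false) hpw hnn 0 R
      le_rfl hR0 (by rw [hsum]; omega)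
    set k : Int := pvFillLevel (PySem.List.sorted ss (fun x => x) false) 0 R with hk
    rw [pvSlev_perm hperm] at h1 h2
    rw [pvBuild_eq cb ts ss k _]
    rw [hloop k hk0 (by omega) (Or.inl (by omega))]
    rw [hnames]
    rfl
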